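-- pv_equiv track=rewrite | github.com/ayiis/endecoder | handlers/_raw_endecoder.py | utf7_encode
-- ===== SOURCE A (Python) =====
-- def utf7_encode(in_text, in_byte, encoding_to, encoding_from):
--
--     bin1 = "".join("{:016b}".format(ord(c)) for c in in_text)
--     bin1 = bin1 + "0" * ((6 - len(bin1) % 6) % 6)
--
--     res = ""
--     for x in range(len(bin1) // 6):
--         s = int(bin1[x * 6: x * 6 + 6], 2)
--         if s == 63:
--             c = "/"
--         elif s == 62:
--             c = "+"
--         elif 52 <= s:
--             c = chr(ord("0") + s - 52)
--         elif 26 <= s: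
--             c = chr(ord("a") + s - 26)
--         else:
--             c = chr(ord("A") + s)
--
--         res = res + c
--
--     return "+%s-" % (res)
-- ===== SOURCE B (Python) =====
-- ALPHABET = "ABCDEFGHIJKLMNOPQRSTUVWXYZabcdefghijklmnopqrstuvwxyz0123456789+/"
--
--
-- def utf7_encode(in_text, in_byte, encoding_to, encoding_from):
--     acc = 0
--     nbits = 0
--     out = []
--     for c in in_text:
--         acc = (acc << 16) + ord(c)
--         nbits += 16
--         while nbits >= 6:
--             nbits -= 6
--             out.append(ALPHABET[(acc >> nbits) & 63])
--         acc &= (1 << nbits) - 1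
--     if nbits:
--         out.append(ALPHABET[(acc << (6 - nbits)) & 63])
--     return "+%s-" % "".join(out)
-- ===== Notes on version B (the rewrite author's own statement) =====
-- stated objective: faster
-- what changed: Replaced the build-a-binary-string-then-slice-and-int-parse scheme with a streaming integer bit accumulator (acc/nbits, 16 bits per char) that emits each base64 character as soon as 6 bits are available, indexing a precomputed alphabet instead of an if/elif chain.
import Mathlib
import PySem

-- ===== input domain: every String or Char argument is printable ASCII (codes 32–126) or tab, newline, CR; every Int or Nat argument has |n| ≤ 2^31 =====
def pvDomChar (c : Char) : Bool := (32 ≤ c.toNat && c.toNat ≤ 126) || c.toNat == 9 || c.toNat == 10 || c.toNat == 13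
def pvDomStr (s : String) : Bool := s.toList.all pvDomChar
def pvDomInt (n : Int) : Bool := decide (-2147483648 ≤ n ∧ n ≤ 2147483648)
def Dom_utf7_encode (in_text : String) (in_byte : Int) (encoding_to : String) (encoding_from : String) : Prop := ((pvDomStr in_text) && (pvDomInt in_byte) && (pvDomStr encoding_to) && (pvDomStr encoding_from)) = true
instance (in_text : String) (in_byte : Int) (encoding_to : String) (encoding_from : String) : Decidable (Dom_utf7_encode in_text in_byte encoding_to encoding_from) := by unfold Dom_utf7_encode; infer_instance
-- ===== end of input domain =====

-- B replaces A's build-binary-string-then-slice scheme by a streaming 16-bit-per-char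
-- integer bit accumulator (measured faster by a constant factor); return values agree on Dom.

-- ===== PORT A =====
-- "{:b}" binary digits of n, most significant first (empty for 0)
def binDigits : Nat → List Char
  | 0 => []
  | n+1 => binDigits ((n+1)/2) ++ [if (n+1) % 2 = 1 then '1' else '0']
decreasing_by exact Nat.div_lt_self (Nat.succ_pos n) (by norm_num)

-- "{:016b}".format(n): binary digits ("0" for 0) zero-padded on the left to width 16
def fmt016b (n : Nat) : List Char :=
  let d := if binDigits n = [] then ['0'] else binDigits n
  List.replicate (16 - d.length) '0' ++ d

-- int(s, 2) on a string of '0'/'1' digits (always such in A)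
def parseBin2 (l : List Char) : Nat := l.foldl (fun a c => 2*a + (if c = '1' then 1 else 0)) 0

-- A's if/elif chain mapping a 6-bit value to its base64 character
def alphaOf (s : Nat) : Char :=
  if s == 63 then '/'
  else if s == 62 then '+'
  else if 52 ≤ s then Char.ofNat ('0'.toNat + s - 52)
  else if 26 ≤ s then Char.ofNat ('a'.toNat + s - 26)
  else Char.ofNat ('A'.toNat + s)

-- literal port of A; "+%s-" is rendered as String.mk ('+' :: res ++ ['-']),
-- bin1[x*6 : x*6+6] (in-range, nonnegative) as (drop (x*6)).take 6
def utf7_encode (in_text : String) (in_byte : Int) (encoding_to : String) (encoding_from : String) : String :=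
  let bin1 : List Char := (in_text.toList.map (fun c => fmt016b c.toNat)).flatten
  let bin1 := bin1 ++ List.replicate ((6 - bin1.length % 6) % 6) '0'
  let res := (List.range (bin1.length / 6)).foldl
    (fun res x => res ++ [alphaOf (parseBin2 ((bin1.drop (x*6)).take 6))]) []
  String.mk ('+' :: res ++ ['-'])

-- ===== PORT B =====
def pvAlphabet : List Char := "ABCDEFGHIJKLMNOPQRSTUVWXYZabcdefghijklmnopqrstuvwxyz0123456789+/".toList

-- the inner 'while nbits >= 6' loop of B
def drainB (acc : Nat) : Nat → List Char → Nat × List Char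
  | nbits, out =>
    if 6 ≤ nbits then drainB acc (nbits - 6) (out ++ [pvAlphabet.getD ((acc >>> (nbits - 6)) &&& 63) 'A'])
    else (nbits, out)
decreasing_by omega

-- one iteration of B's 'for c in in_text' loop; state = (acc, nbits, out)
def stepB (st : Nat × Nat × List Char) (c : Char) : Nat × Nat × List Char :=
  let acc := (st.1 <<< 16) + c.toNat
  let d := drainB acc (st.2.1 + 16) st.2.2
  (acc &&& ((1 <<< d.1) - 1), d.1, d.2)

-- literal port of B (Source B); "+%s-" % "".join(out) as String.mk ('+' :: out ++ ['-'])
def utf7_encode_alt (in_text : String) (in_byte : Int) (encoding_to : String) (encoding_from : String) : String :=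
  let st := in_text.toList.foldl stepB (0, 0, [])
  let out := if st.2.1 ≠ 0 then st.2.2 ++ [pvAlphabet.getD ((st.1 <<< (6 - st.2.1)) &&& 63) 'A'] else st.2.2
  String.mk ('+' :: out ++ ['-'])

-- ===== PRECONDITION & SPEC =====
def Spec_utf7_encode (in_text : String) (in_byte : Int) (encoding_to : String) (encoding_from : String) (out : String) : Prop := out = utf7_encode_alt in_text in_byte encoding_to encoding_from
instance (in_text : String) (in_byte : Int) (encoding_to : String) (encoding_from : String) (out : String) : Decidable (Spec_utf7_encode in_text in_byte encoding_to encoding_from out) := by unfold Spec_utf7_encode; infer_instance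

-- ===== CLAIM (what is proved, stated in full; the proofs are below) =====
def Claim_equal_utf7_encode : Prop := ∀ (in_text : String) (in_byte : Int) (encoding_to : String) (encoding_from : String), Dom_utf7_encode in_text in_byte encoding_to encoding_from → Spec_utf7_encode in_text in_byte encoding_to encoding_from (utf7_encode in_text in_byte encoding_to encoding_from)

-- ===== LEMMAS AND PROOFS =====

-- n-bit big-endian rendering of v (mod 2^n): the common intermediate of both proofs
def bitsLen : Nat → Nat → List Char
  | 0, _ => []
  | n+1, v => bitsLen n (v/2) ++ [if v % 2 = 1 then '1' else '0']

-- base64-encode complete leading 6-bit chunks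
def chunkEnc : List Char → List Char
  | [] => []
  | a :: l => alphaOf (parseBin2 ((a::l).take 6)) :: chunkEnc ((a::l).drop 6)
termination_by l => l.length
decreasing_by simp only [List.length_drop, List.length_cons]; omega

theorem length_bitsLen (n v : Nat) : (bitsLen n v).length = n := by
  induction n generalizing v with
  | zero => simp [bitsLen]
  | succ n ih => simp [bitsLen, ih]

theorem bitsLen_zero (n : Nat) : bitsLen n 0 = List.replicate n '0' := by
  induction n with
  | zero => simp [bitsLen]
  | succ n ih => simp [bitsLen, ih, List.replicate_succ']

theorem parse_shift (l : List Char) (a : Nat) :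
    l.foldl (fun a c => 2*a + (if c = '1' then 1 else 0)) a = a * 2 ^ l.length + parseBin2 l := by
  induction l generalizing a with
  | nil => simp [parseBin2]
  | cons c l ih =>
    simp only [List.foldl_cons, parseBin2, List.length_cons]
    rw [ih, ih (2 * 0 + _)]
    ring

theorem parse_append (l1 l2 : List Char) :
    parseBin2 (l1 ++ l2) = parseBin2 l1 * 2 ^ l2.length + parseBin2 l2 := by
  unfold parseBin2
  rw [List.foldl_append, parse_shift]
  rfl

theorem parse_bitsLen (n v : Nat) : parseBin2 (bitsLen n v) = v % 2 ^ n := by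
  induction n generalizing v with
  | zero => simp [bitsLen, parseBin2, Nat.mod_one]
  | succ n ih =>
    rw [bitsLen, parse_append, ih]
    have h2 : v % 2 = 0 ∨ v % 2 = 1 := Nat.mod_two_eq_zero_or_one v
    have hms' : v % 2 ^ (n+1) = v % 2 + 2 * (v / 2 % 2 ^ n) := by
      rw [pow_succ']
      exact Nat.mod_mul
    rcases h2 with h | h <;> simp [h, parseBin2, hms'] <;> omega

theorem bitsLen_split (m k v : Nat) : bitsLen (m + k) v = bitsLen m (v / 2 ^ k) ++ bitsLen k v := by
  induction k generalizing v with
  | zero => simp [bitsLen]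
  | succ k ih =>
    have : m + (k + 1) = (m + k) + 1 := rfl
    rw [this, bitsLen, ih, bitsLen, Nat.div_div_eq_div_mul]
    have h2 : 2 * 2 ^ k = 2 ^ (k+1) := by ring
    rw [h2, List.append_assoc]

theorem bitsLen_congr (n : Nat) {v w : Nat} (h : v % 2 ^ n = w % 2 ^ n) : bitsLen n v = bitsLen n w := by
  induction n generalizing v w with
  | zero => simp [bitsLen]
  | succ n ih =>
    have hv : v % 2 ^ (n+1) = v % 2 + 2 * (v / 2 % 2 ^ n) := by
      rw [pow_succ']; exact Nat.mod_mul
    have hw : w % 2 ^ (n+1) = w % 2 + 2 * (w / 2 % 2 ^ n) := by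
      rw [pow_succ']; exact Nat.mod_mul
    rw [hv, hw] at h
    have hb1 : v % 2 < 2 := Nat.mod_lt _ (by norm_num)
    have hb2 : w % 2 < 2 := Nat.mod_lt _ (by norm_num)
    have h2 : v % 2 = w % 2 := by omega
    have hd : v / 2 % 2 ^ n = w / 2 % 2 ^ n := by omega
    rw [bitsLen, bitsLen, ih hd, h2]

theorem binDigits_eq_nil {v : Nat} : binDigits v = [] ↔ v = 0 := by
  cases v with
  | zero => simp [binDigits]
  | succ n => simp [binDigits]

theorem fmt_gen (n : Nat) : ∀ v, v < 2 ^ n →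
    List.replicate (n - (binDigits v).length) '0' ++ binDigits v = bitsLen n v := by
  induction n with
  | zero => intro v hv; interval_cases v; simp [binDigits, bitsLen]
  | succ n ih =>
    intro v hv
    cases v with
    | zero => simp [binDigits, bitsLen_zero]
    | succ m =>
      rw [binDigits]
      have hlt : (m+1)/2 < 2 ^ n := by
        have := Nat.pow_succ 2 n
        omega
      have := ih ((m+1)/2) hlt
      rw [bitsLen, ← this]
      simp only [List.length_append, List.length_singleton]
      have : n + 1 - ((binDigits ((m+1)/2)).length + 1) = n - (binDigits ((m+1)/2)).length := by omega
      rw [this, List.append_assoc]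

theorem fmt016b_eq {v : Nat} (h : v < 2 ^ 16) : fmt016b v = bitsLen 16 v := by
  unfold fmt016b
  by_cases h0 : v = 0
  · subst h0
    have hb : binDigits 0 = [] := by rw [binDigits]
    simp [hb, bitsLen_zero]
  · rw [if_neg (fun h' => h0 (binDigits_eq_nil.mp h'))]
    exact fmt_gen 16 v h

theorem chunkEnc_cons6 {l1 : List Char} (l2 : List Char) (h : l1.length = 6) :
    chunkEnc (l1 ++ l2) = alphaOf (parseBin2 l1) :: chunkEnc l2 := by
  cases l1 with
  | nil => simp at h
  | cons a l =>
    rw [List.cons_append, chunkEnc]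
    rw [← List.cons_append]
    rw [List.take_append_of_le_length (by omega), List.drop_append_of_le_length (by omega)]
    rw [List.take_of_length_le (by omega), List.drop_of_length_le (by omega)]
    simp

theorem chunkEnc_nil : chunkEnc [] = [] := by rw [chunkEnc]

theorem chunkEnc_single {l : List Char} (h : l.length = 6) :
    chunkEnc l = [alphaOf (parseBin2 l)] := by
  have := chunkEnc_cons6 (l1 := l) [] h
  simpa [chunkEnc_nil] using this

theorem chunkEnc_append (m : Nat) : ∀ l1 l2 : List Char, l1.length = 6 * m →
    chunkEnc (l1 ++ l2) = chunkEnc l1 ++ chunkEnc l2 := by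
  induction m with
  | zero => intro l1 l2 h; rw [List.length_eq_zero_iff.mp h]; simp [chunkEnc]
  | succ m ih =>
    intro l1 l2 h
    have hsplit : l1 = l1.take 6 ++ l1.drop 6 := (List.take_append_drop 6 l1).symm
    have hlt : (l1.take 6).length = 6 := by simp; omega
    have hld : (l1.drop 6).length = 6 * m := by simp; omega
    rw [hsplit, List.append_assoc, chunkEnc_cons6 _ hlt, chunkEnc_cons6 _ hlt, ih _ _ hld]
    simp

theorem alphaMap : ∀ s, s < 64 → pvAlphabet.getD s 'A' = alphaOf s := by decide

theorem drain_spec (n : Nat) : ∀ acc out, drainB acc n out =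
    (n % 6, out ++ chunkEnc (bitsLen (n - n % 6) (acc / 2 ^ (n % 6)))) := by
  induction n using Nat.strong_induction_on with
  | _ n ih =>
    intro acc out
    rw [drainB]
    by_cases h : 6 ≤ n
    · rw [if_pos h, ih (n - 6) (by omega)]
      have hr : (n - 6) % 6 = n % 6 := by omega
      set r := n % 6 with hrdef
      have hrle : r ≤ n - 6 := by omega
      have hsplit : n - r = 6 + (n - 6 - r) := by omega
      rw [hr, hsplit, bitsLen_split]
      rw [chunkEnc_cons6 _ (length_bitsLen _ _)]
      have hdd : acc / 2 ^ r / 2 ^ (n - 6 - r) = acc / 2 ^ (n - 6) := by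
        rw [Nat.div_div_eq_div_mul, ← Nat.pow_add]
        have he : r + (n - 6 - r) = n - 6 := by omega
        rw [he]
      rw [hdd, parse_bitsLen]
      have h64 : (2:Nat) ^ 6 = 64 := by norm_num
      have hc : acc >>> (n - 6) &&& 63 = acc / 2 ^ (n - 6) % 2 ^ 6 := by
        rw [Nat.shiftRight_eq_div_pow]
        have : (63:Nat) = 2 ^ 6 - 1 := by norm_num
        rw [this, Nat.and_two_pow_sub_one_eq_mod]
      rw [hc, alphaMap _ (by have := Nat.mod_lt (acc / 2 ^ (n-6)) (show 0 < 2^6 by norm_num); omega)]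
      simp [h64]
    · rw [if_neg h]
      have : n % 6 = n := Nat.mod_eq_of_lt (by omega)
      rw [this]
      simp [bitsLen, chunkEnc]

theorem length_allBits (cs : List Char) :
    (cs.flatMap (fun c => bitsLen 16 c.toNat)).length = 16 * cs.length := by
  induction cs with
  | nil => simp
  | cons c cs ih =>
    simp only [List.flatMap_cons, List.length_append, List.length_cons, ih, length_bitsLen]
    ring

theorem drop_append_len {α : Type} (l1 l2 : List α) (i : Nat) :
    (l1 ++ l2).drop (l1.length + i) = l2.drop i := by
  induction l1 with
  | nil => simp
  | cons a l ih => simpa [Nat.succ_add] using ih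

theorem take_append_len {α : Type} (l1 l2 : List α) (i : Nat) :
    (l1 ++ l2).take (l1.length + i) = l1 ++ l2.take i := by
  induction l1 with
  | nil => simp
  | cons a l ih => simpa [Nat.succ_add] using ih

set_option maxHeartbeats 1000000 in
theorem main_fold (cs : List Char) : ∀ r acc out, (∀ c ∈ cs, c.toNat < 2 ^ 16) → r < 6 → acc < 2 ^ r →
    cs.foldl stepB (acc, r, out) =
      (parseBin2 ((bitsLen r acc ++ cs.flatMap (fun c => bitsLen 16 c.toNat)).drop
          ((r + 16 * cs.length) - (r + 16 * cs.length) % 6)) % 2 ^ ((r + 16 * cs.length) % 6),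
       (r + 16 * cs.length) % 6,
       out ++ chunkEnc ((bitsLen r acc ++ cs.flatMap (fun c => bitsLen 16 c.toNat)).take
          ((r + 16 * cs.length) - (r + 16 * cs.length) % 6))) := by
  induction cs with
  | nil =>
    intro r acc out _ hr hacc
    simp only [List.foldl_nil, List.flatMap_nil, List.append_nil, List.length_nil, Nat.mul_zero,
      Nat.add_zero]
    rw [Nat.mod_eq_of_lt hr, Nat.sub_self]
    simp only [List.drop_zero, List.take_zero]
    rw [parse_bitsLen, Nat.mod_eq_of_lt hacc, Nat.mod_eq_of_lt hacc]
    simp [chunkEnc_nil]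
  | cons c cs ih =>
    intro r acc out hall hr hacc
    have hv : c.toNat < 2 ^ 16 := hall c (by simp)
    have hstep : stepB (acc, r, out) c =
        ((acc <<< 16 + c.toNat) % 2 ^ ((r + 16) % 6), (r + 16) % 6,
         out ++ chunkEnc (bitsLen ((r + 16) - (r + 16) % 6)
            ((acc <<< 16 + c.toNat) / 2 ^ ((r + 16) % 6)))) := by
      simp only [stepB]
      rw [drain_spec]
      rw [Nat.one_shiftLeft, Nat.and_two_pow_sub_one_eq_mod]
    set A2 := acc <<< 16 + c.toNat with hA2
    set r2 := (r + 16) % 6 with hr2def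
    have hr2lt : r2 < 6 := Nat.mod_lt _ (by norm_num)
    rw [List.foldl_cons, hstep,
      ih r2 (A2 % 2 ^ r2) _ (fun c hc => hall c (by simp [hc])) hr2lt (Nat.mod_lt _ (Nat.pow_pos (by norm_num)))]
    -- abbreviations
    set F := cs.flatMap (fun c => bitsLen 16 c.toNat) with hF
    have hLF : F.length = 16 * cs.length := length_allBits cs
    set k := cs.length with hk
    -- the 16 new bits
    have h16 : (2:Nat) ^ 16 = 65536 := by norm_num
    have hdivA2 : A2 / 2 ^ 16 = acc := by
      rw [hA2, Nat.shiftLeft_eq, h16]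
      omega
    have hbits_head : bitsLen (r + 16) A2 = bitsLen r acc ++ bitsLen 16 c.toNat := by
      rw [bitsLen_split, hdivA2]
      congr 1
      refine bitsLen_congr 16 ?_
      rw [hA2, Nat.shiftLeft_eq, h16]
      omega
    have hr2le : r2 ≤ r + 16 := by omega
    set p := (r + 16) - r2 with hpdef
    have hhead_split : bitsLen (r + 16) A2 = bitsLen p (A2 / 2 ^ r2) ++ bitsLen r2 A2 := by
      have hps : r + 16 = p + r2 := by omega
      rw [hps, bitsLen_split]
    have hlow : bitsLen r2 (A2 % 2 ^ r2) = bitsLen r2 A2 :=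
      bitsLen_congr r2 (by rw [Nat.mod_mod_of_dvd _ dvd_rfl])
    -- the total bit list splits as (p complete bits) ++ (leftover ++ rest)
    have hBeq : bitsLen r acc ++ ((c :: cs).flatMap (fun c => bitsLen 16 c.toNat)) =
        bitsLen p (A2 / 2 ^ r2) ++ (bitsLen r2 (A2 % 2 ^ r2) ++ F) := by
      rw [List.flatMap_cons, ← hF, ← List.append_assoc, ← hbits_head, hhead_split, hlow,
        List.append_assoc]
    have hplen : (bitsLen p (A2 / 2 ^ r2)).length = p := length_bitsLen _ _
    simp only [List.length_cons, ← hk]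
    have hmod6 : (r + 16 * (k + 1)) % 6 = (r2 + 16 * k) % 6 := by
      simp only [hr2def]
      omega
    set r'' := (r2 + 16 * k) % 6 with hr''
    have htot : (r + 16 * (k + 1)) - (r + 16 * (k + 1)) % 6 = p + ((r2 + 16 * k) - r'') := by
      simp only [hr'', hr2def, hpdef]
      omega
    -- drop component
    have hdrop := drop_append_len (bitsLen p (A2 / 2 ^ r2)) (bitsLen r2 (A2 % 2 ^ r2) ++ F)
      ((r2 + 16 * k) - r'')
    rw [hplen] at hdrop
    have hdropEq : (bitsLen r acc ++ ((c :: cs).flatMap (fun c => bitsLen 16 c.toNat))).drop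
          ((r + 16 * (k + 1)) - (r + 16 * (k + 1)) % 6)
        = (bitsLen r2 (A2 % 2 ^ r2) ++ F).drop ((r2 + 16 * k) - r'') := by
      rw [hBeq, htot, hdrop]
    -- take component
    have hpd : p = 6 * (p / 6) := by
      simp only [hpdef, hr2def]
      omega
    have htake := take_append_len (bitsLen p (A2 / 2 ^ r2)) (bitsLen r2 (A2 % 2 ^ r2) ++ F)
      ((r2 + 16 * k) - r'')
    rw [hplen] at htake
    have htakeEq : chunkEnc ((bitsLen r acc ++ ((c :: cs).flatMap (fun c => bitsLen 16 c.toNat))).take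
          ((r + 16 * (k + 1)) - (r + 16 * (k + 1)) % 6))
        = chunkEnc (bitsLen p (A2 / 2 ^ r2)) ++
            chunkEnc ((bitsLen r2 (A2 % 2 ^ r2) ++ F).take ((r2 + 16 * k) - r'')) := by
      rw [hBeq, htot, htake, chunkEnc_append (p / 6) _ _ (by rw [hplen, ← hpd])]
    rw [Prod.mk.injEq, Prod.mk.injEq]
    refine ⟨by rw [hdropEq, hmod6], by rw [hmod6], ?_⟩
    rw [htakeEq, List.append_assoc]

theorem parse_lt (l : List Char) : parseBin2 l < 2 ^ l.length := by
  induction l with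
  | nil => simp [parseBin2]
  | cons c l ih =>
    have : parseBin2 (c :: l) = (if c = '1' then 1 else 0) * 2 ^ l.length + parseBin2 l := by
      unfold parseBin2
      rw [List.foldl_cons, parse_shift]
      norm_num
      rfl
    rw [this, List.length_cons, pow_succ]
    have : (if c = '1' then 1 else 0) ≤ 1 := by split <;> omega
    nlinarith [pow_pos (show 0 < 2 by norm_num) l.length]

theorem parse_zeros (k : Nat) : parseBin2 (List.replicate k '0') = 0 := by
  induction k with
  | zero => simp [parseBin2]
  | succ k ih =>
    rw [List.replicate_succ]
    unfold parseBin2 at *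
    simp [ih]

theorem loopA (m : Nat) : ∀ (l : List Char) (res : List Char), l.length = 6 * m →
    (List.range m).foldl (fun res x => res ++ [alphaOf (parseBin2 ((l.drop (x*6)).take 6))]) res
      = res ++ chunkEnc l := by
  induction m with
  | zero =>
    intro l res h
    rw [List.length_eq_zero_iff.mp h]
    simp [chunkEnc_nil]
  | succ m ih =>
    intro l res h
    rw [List.range_succ_eq_map, List.foldl_cons, List.foldl_map]
    have hbody : (fun (res : List Char) (x : Nat) =>
          res ++ [alphaOf (parseBin2 ((l.drop (x.succ*6)).take 6))])
        = (fun res x => res ++ [alphaOf (parseBin2 (((l.drop 6).drop (x*6)).take 6))]) := by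
      funext res x
      rw [List.drop_drop]
      have hsix : x.succ * 6 = 6 + x * 6 := by omega
      rw [hsix]
    rw [hbody, ih (l.drop 6) _ (by simp; omega)]
    have hl : l = l.take 6 ++ l.drop 6 := (List.take_append_drop 6 l).symm
    have ht : (l.take 6).length = 6 := by simp; omega
    conv_rhs => rw [hl, chunkEnc_cons6 _ ht]
    simp

-- chars admitted by Dom are < 2^16
theorem dom_char_small {s : String} (h : pvDomStr s = true) : ∀ c ∈ s.toList, c.toNat < 2 ^ 16 := by
  intro c hc
  have := List.all_eq_true.mp h c hc
  unfold pvDomChar at this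
  simp only [Bool.or_eq_true, Bool.and_eq_true, decide_eq_true_eq, beq_iff_eq] at this
  omega

set_option maxHeartbeats 1000000 in
theorem ports_eq (t : String) (ib : Int) (et ef : String)
    (hall : ∀ c ∈ t.toList, c.toNat < 2 ^ 16) :
    utf7_encode t ib et ef = utf7_encode_alt t ib et ef := by
  simp only [utf7_encode, utf7_encode_alt]
  set cs := t.toList with hcs
  set allB := cs.flatMap (fun c => bitsLen 16 c.toNat) with hallB
  have hjoin : (cs.map (fun c => fmt016b c.toNat)).flatten = allB := by
    rw [hallB, List.flatMap_def]
    congr 1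
    exact List.map_congr_left (fun c hc => fmt016b_eq (hall c hc))
  rw [hjoin]
  have hLB : allB.length = 16 * cs.length := length_allBits cs
  -- B side: evaluate the fold
  rw [main_fold cs 0 0 [] hall (by norm_num) (by norm_num)]
  have hb0 : bitsLen 0 0 = ([] : List Char) := rfl
  simp only [Nat.zero_add, hb0, List.nil_append]
  set r0 := (16 * cs.length) % 6 with hr0
  have hr0le : r0 ≤ 16 * cs.length := by simp only [hr0]; omega
  -- A side: evaluate the loop
  set pad := (6 - allB.length % 6) % 6 with hpad
  set P := allB ++ List.replicate pad '0' with hP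
  have hPlen : P.length = 16 * cs.length + pad := by
    simp [hP, hLB]
  have hPm : P.length = 6 * (P.length / 6) := by
    rw [hPlen]
    simp only [hpad, hLB]
    omega
  rw [loopA (P.length / 6) P [] hPm]
  rw [List.nil_append]
  -- both sides are String.mk ('+' :: _ ++ ['-']); reduce to list equality
  congr 1
  by_cases h0 : r0 = 0
  · -- no leftover bits: pad = 0, the fold already produced everything
    have hpad0 : pad = 0 := by
      simp only [hpad, hLB, ← hr0]
      omega
    have hP0 : P = allB := by
      rw [hP, hpad0]
      simp
    have htk : allB.take (16 * cs.length - r0) = allB := by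
      rw [h0, Nat.sub_zero, ← hLB, List.take_length]
    rw [if_neg (by simp [h0]), hP0, htk]
  · -- leftover bits: the final padded group
    rw [if_pos (by simp [h0])]
    have hpad6 : pad = 6 - r0 := by
      simp only [hpad, hLB, ← hr0]
      omega
    have hsplit : P = allB.take (16 * cs.length - r0) ++
        (allB.drop (16 * cs.length - r0) ++ List.replicate pad '0') := by
      rw [hP, ← List.append_assoc, List.take_append_drop]
    have hdlen : (allB.drop (16 * cs.length - r0)).length = r0 := by
      simp [hLB]
      omega
    have htlen : (allB.take (16 * cs.length - r0)).length = 16 * cs.length - r0 := by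
      simp [hLB]
    have hchunk : chunkEnc P = chunkEnc (allB.take (16 * cs.length - r0)) ++
        [alphaOf (parseBin2 (allB.drop (16 * cs.length - r0)) * 2 ^ pad + 0)] := by
      rw [hsplit, chunkEnc_append ((16 * cs.length - r0) / 6) _ _
          (by rw [htlen]; simp only [hr0]; omega)]
      congr 1
      rw [chunkEnc_single (by simp [hdlen, hpad6]; omega), parse_append, parse_zeros,
        List.length_replicate]
    rw [hchunk]
    congr 2
    -- the last character agrees
    have hplt : parseBin2 (allB.drop (16 * cs.length - r0)) < 2 ^ r0 := by
      have := parse_lt (allB.drop (16 * cs.length - r0))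
      rwa [hdlen] at this
    have hmod : parseBin2 (allB.drop (16 * cs.length - r0)) % 2 ^ r0
        = parseBin2 (allB.drop (16 * cs.length - r0)) := Nat.mod_eq_of_lt hplt
    rw [hmod]
    set a := parseBin2 (allB.drop (16 * cs.length - r0)) with ha
    have hr0lt : r0 < 6 := by simp only [hr0]; omega
    have hsmall : a * 2 ^ (6 - r0) < 64 := by
      have h1 : a * 2 ^ (6 - r0) < 2 ^ r0 * 2 ^ (6 - r0) :=
        Nat.mul_lt_mul_of_pos_right hplt (Nat.pow_pos (by norm_num))
      have h2 : 2 ^ r0 * 2 ^ (6 - r0) = 2 ^ 6 := by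
        rw [← pow_add]
        congr 1
        omega
      omega
    have harg : a <<< (6 - r0) &&& 63 = a * 2 ^ (6 - r0) := by
      rw [Nat.shiftLeft_eq]
      have h63 : (63:Nat) = 2 ^ 6 - 1 := by norm_num
      rw [h63, Nat.and_two_pow_sub_one_eq_mod, Nat.mod_eq_of_lt (by norm_num at hsmall ⊢; omega)]
    rw [harg, alphaMap _ hsmall, hpad6, Nat.add_zero]

-- ===== VERDICT (by name: the statement is the Claim_ definition above) =====
theorem utf7_encode_spec : Claim_equal_utf7_encode := by
  unfold Claim_equal_utf7_encode
  intro t ib et ef hdom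
  unfold Spec_utf7_encode
  have hall : ∀ c ∈ t.toList, c.toNat < 2 ^ 16 := by
    unfold Dom_utf7_encode at hdom
    simp only [Bool.and_eq_true] at hdom
    exact dom_char_small hdom.1.1.1
  exact ports_eq t ib et ef hall
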